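-- pv_equiv track=rewrite | github.com/rukshar69/ProjectEuler100 | prb46.py | solution
-- ===== SOURCE A (Python) =====
-- def solution(limit):
--     erathosthenes = [True for i in range(1+limit)]
--     erathosthenes[0] = False
--     erathosthenes[1] = False
--
--     for i in range(4,limit+1,2): erathosthenes[i] = False
--
--     for i in range(3,limit+1,2):
--         if erathosthenes[i]:
--             for k in range(i*i, limit+1,i):
--                 erathosthenes[k] = False
--         else:
--             k = 1
--             witness = False
--             while k*k*2<i:
--                 if erathosthenes[ i - k*k*2] == True:
--                     witness = True
--                     break
--                 k+=1
--             if witness==False: return i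
-- ===== SOURCE B (Python) =====
-- def solution(limit):
--     if limit < 1:
--         return None
--     sieve = [True] * (limit + 1)
--     sieve[0] = False
--     sieve[1] = False
--     for i in range(2, limit + 1):
--         if sieve[i]:
--             for m in range(i * i, limit + 1, i):
--                 sieve[m] = False
--     twoks = []
--     k = 1
--     while 2 * k * k <= limit:
--         twoks.append(2 * k * k)
--         k += 1
--     expressible = [False] * (limit + 1)
--     for p in range(2, limit + 1):
--         if sieve[p]:
--             for t in twoks:
--                 if p + t > limit:
--                     break
--                 expressible[p + t] = True
--     for i in range(3, limit + 1, 2):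
--         if not sieve[i] and not expressible[i]:
--             return i
--     return None
-- ===== Notes on version B (the rewrite author's own statement) =====
-- stated objective: alternative
-- what changed: B replaces A's single interleaved loop (sieving primes while back-scanning twice-a-square offsets with sieve lookups for each odd composite met) by three independent passes: a complete Eratosthenes sieve, an 'expressible' boolean table filled forward by marking every prime-plus-twice-a-square sum, and a final scan returning the first odd composite left unmarked.
import Mathlib
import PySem

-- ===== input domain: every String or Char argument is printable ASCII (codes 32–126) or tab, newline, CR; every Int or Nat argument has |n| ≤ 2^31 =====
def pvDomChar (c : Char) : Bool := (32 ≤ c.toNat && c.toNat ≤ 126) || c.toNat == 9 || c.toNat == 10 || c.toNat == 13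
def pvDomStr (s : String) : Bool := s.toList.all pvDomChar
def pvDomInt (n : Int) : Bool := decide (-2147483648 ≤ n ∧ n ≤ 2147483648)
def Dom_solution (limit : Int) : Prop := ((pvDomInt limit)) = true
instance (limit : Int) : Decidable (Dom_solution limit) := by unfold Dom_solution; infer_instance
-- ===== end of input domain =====

-- B replaces A's single interleaved sieve loop (which back-scans twice-a-square offsets with sieve
-- lookups per odd composite) by three independent passes: a full Eratosthenes sieve, a forward-marked
-- 'expressible' table (per prime, mark its prime-plus-twice-a-square sums), and a final scan;
-- alternative decomposition, not faster.

-- ===== PORT A =====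
-- Python range(a,b,s) for s ≥ 1 (exact on that domain; callers use s ≥ 1 only)
def rng (a b s : Nat) : List Nat :=
  if _h : a < b ∧ 0 < s then a :: rng (a + s) b s else []
termination_by b - a
decreasing_by omega

-- shared inner loop text `for m in range(i*i, limit+1, i): arr[m] = False` of both Pythons
def markMultiples (n : Nat) (arr : List Bool) (i : Nat) : List Bool :=
  (rng (i * i) (n + 1) i).foldl (fun a m => a.set m false) arr

def witnessLoop (arr : List Bool) (i k : Nat) : Bool :=
  if k * k * 2 < i then
    if arr.getD (i - k * k * 2) false then true else witnessLoop arr i (k + 1)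
  else false
termination_by i - k * k * 2
decreasing_by
  have h : k * k + 1 ≤ (k + 1) * (k + 1) := by nlinarith
  omega

def loopA (n : Nat) (arr : List Bool) : List Nat → Option Int
  | [] => none
  | i :: rest =>
    if arr.getD i false then loopA n (markMultiples n arr i) rest
    else if witnessLoop arr i 1 then loopA n arr rest
    else some (i : Int)

def solution (limit : Int) : Option Int :=
  if limit < 1 then none   -- Python raises IndexError here (totality guard)
  else
    let n := limit.toNat
    let base := ((List.replicate (n + 1) true).set 0 false).set 1 false
    let arr := (rng 4 (n + 1) 2).foldl (fun a m => a.set m false) base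
    loopA n arr (rng 3 (n + 1) 2)

-- ===== PORT B =====
def sieveB (n : Nat) : List Bool :=
  (rng 2 (n + 1) 1).foldl
    (fun a i => if a.getD i false then markMultiples n a i else a)
    (((List.replicate (n + 1) true).set 0 false).set 1 false)

def twoksLoop (n k : Nat) : List Nat :=
  if 2 * k * k ≤ n then 2 * k * k :: twoksLoop n (k + 1) else []
termination_by n + 1 - 2 * k * k
decreasing_by
  have h : 2 * k * k + 1 ≤ 2 * (k + 1) * (k + 1) := by nlinarith
  omega

def exprMark (n : Nat) (e : List Bool) (p : Nat) : List Nat → List Bool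
  | [] => e
  | t :: rest => if p + t > n then e else exprMark n (e.set (p + t) true) p rest

def exprB (n : Nat) (sieve : List Bool) : List Bool :=
  let twoks := twoksLoop n 1
  (rng 2 (n + 1) 1).foldl
    (fun e p => if sieve.getD p false then exprMark n e p twoks else e)
    (List.replicate (n + 1) false)

def solution_alt (limit : Int) : Option Int :=
  if limit < 1 then none
  else
    let n := limit.toNat
    let sieve := sieveB n
    let e := exprB n sieve
    ((rng 3 (n + 1) 2).find? (fun i => !sieve.getD i false && !e.getD i false)).map
      (fun i => (i : Int))



-- ===== PRECONDITION & SPEC =====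
-- Pre_ excludes exactly the non-positive limits, on which Python A raises IndexError (the sieve list is too short for its first two assignments)
def Pre_solution (limit : Int) : Prop := 1 ≤ limit
instance (limit : Int) : Decidable (Pre_solution limit) := by unfold Pre_solution; infer_instance

def pvWitness_solution : Int := (20)

def Spec_solution (limit : Int) (out : Option Int) : Prop := out = solution_alt limit
instance (limit : Int) (out : Option Int) : Decidable (Spec_solution limit out) := by unfold Spec_solution; infer_instance

-- ===== CLAIM (what is proved, stated in full; the proofs are below) =====
def Claim_equal_solution : Prop := ∀ (limit : Int), Dom_solution limit → Pre_solution limit → Spec_solution limit (solution limit)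

-- ===== LEMMAS AND PROOFS =====
-- ===== basic list lemmas =====
theorem getD_set (l : List Bool) (i j : Nat) (c : Bool) :
    (l.set i c).getD j false = if i = j ∧ j < l.length then c else l.getD j false := by
  simp [List.getD_eq_getElem?_getD, List.getElem?_set]
  split_ifs <;> simp_all

theorem length_foldl_set (l : List Nat) (arr : List Bool) (c : Bool) :
    (l.foldl (fun a m => a.set m c) arr).length = arr.length := by
  induction l generalizing arr with
  | nil => rfl
  | cons x xs ih => simp [List.foldl_cons, ih]

theorem getD_foldl_set (l : List Nat) (arr : List Bool) (c : Bool) (j : Nat) :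
    (l.foldl (fun a m => a.set m c) arr).getD j false =
      if j ∈ l ∧ j < arr.length then c else arr.getD j false := by
  induction l generalizing arr with
  | nil => simp
  | cons x xs ih =>
      rw [List.foldl_cons, ih]
      simp only [List.length_set, getD_set, List.mem_cons]
      by_cases hx : x = j <;> by_cases hj : j < arr.length <;> by_cases hm : j ∈ xs <;>
        simp_all <;> (intro h; exact absurd h.symm hx)

theorem find?_congr (l : List Nat) (f g : Nat → Bool) (h : ∀ x ∈ l, f x = g x) :
    l.find? f = l.find? g := by
  induction l with
  | nil => rfl
  | cons x xs ih =>
      simp only [List.find?_cons]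
      rw [h x (by simp)]
      cases g x <;> simp [ih (fun y hy => h y (by simp [hy]))]

-- ===== rng lemmas =====
theorem rng_cons (a b s : Nat) (h : a < b) (hs : 0 < s) :
    rng a b s = a :: rng (a + s) b s := by
  rw [rng]; simp [h, hs]

theorem rng_nil (a b s : Nat) (h : b ≤ a) : rng a b s = [] := by
  rw [rng]; simp; omega

theorem mem_rng (a b s j : Nat) (hs : 0 < s) :
    j ∈ rng a b s ↔ a ≤ j ∧ j < b ∧ s ∣ (j - a) := by
  by_cases h : a < b
  · rw [rng_cons a b s h hs]
    have ih := mem_rng (a + s) b s j hs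
    simp only [List.mem_cons, ih]
    constructor
    · rintro (rfl | ⟨h1, h2, t, ht⟩)
      · exact ⟨le_refl _, h, 0, by omega⟩
      · have hmul : s * (t + 1) = s * t + s := by ring
        exact ⟨by omega, h2, t + 1, by omega⟩
    · rintro ⟨h1, h2, t, ht⟩
      rcases Nat.eq_zero_or_pos t with rfl | hp
      · left; omega
      · right
        have hst : s ≤ s * t := Nat.le_mul_of_pos_right s hp
        have hmul : s * t = s * (t - 1) + s := by
          have h3 : t - 1 + 1 = t := by omega
          calc s * t = s * (t - 1 + 1) := by rw [h3]
          _ = s * (t - 1) + s := by ring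
        exact ⟨by omega, h2, t - 1, by omega⟩
  · rw [rng_nil a b s (by omega)]
    constructor
    · intro hmem; simp at hmem
    · rintro ⟨h1, h2, -⟩; omega
termination_by b - a
decreasing_by omega

-- ===== number theory layer =====
abbrev noSmall (i j : Nat) : Prop := ∀ p, p < i → p.Prime → p ∣ j → p * p ≤ j → False

theorem noSmall_iff_prime (i j : Nat) (h : j ≤ i) : (2 ≤ j ∧ noSmall i j) ↔ j.Prime := by
  constructor
  · rintro ⟨h2, hns⟩
    by_contra hnp
    have hj1 : j ≠ 1 := by omega
    have hp : (j.minFac).Prime := Nat.minFac_prime hj1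
    have hd : j.minFac ∣ j := Nat.minFac_dvd j
    have hsq : j.minFac * j.minFac ≤ j := by
      have := Nat.minFac_sq_le_self (by omega : 0 < j) hnp
      simpa [Nat.pow_two] using this
    have h2p : 2 ≤ j.minFac := hp.two_le
    have hlt : j.minFac < j := by nlinarith
    exact hns j.minFac (by omega) hp hd hsq
  · intro hp
    refine ⟨hp.two_le, fun p hpi hpp hdvd hsq => ?_⟩
    rcases (Nat.Prime.eq_one_or_self_of_dvd hp p hdvd) with h1 | hself
    · exact absurd h1 hpp.one_lt.ne'
    · have h2p : 2 ≤ p := hpp.two_le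
      subst hself; nlinarith

-- ===== sieve invariant =====
def SInv (n i : Nat) (arr : List Bool) : Prop :=
  arr.length = n + 1 ∧ ∀ j, arr.getD j false = decide (j ≤ n ∧ 2 ≤ j ∧ noSmall i j)

theorem base_getD (n j : Nat) :
    (((List.replicate (n + 1) true).set 0 false).set 1 false).getD j false
      = decide (j ≤ n ∧ 2 ≤ j) := by
  rw [getD_set, getD_set]
  simp only [List.length_set, List.length_replicate]
  have hrep : (List.replicate (n + 1) true).getD j false = decide (j < n + 1) := by
    simp [List.getD_eq_getElem?_getD, List.getElem?_replicate]
    split_ifs <;> simp_all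
  split_ifs <;> simp_all <;> omega

theorem inv_base (n : Nat) :
    SInv n 2 (((List.replicate (n + 1) true).set 0 false).set 1 false) := by
  refine ⟨by simp, fun j => ?_⟩
  rw [base_getD]
  have h2 : noSmall 2 j := fun p hp hpp _ _ => by
    have := hpp.two_le; omega
  exact decide_eq_decide.mpr (by tauto)

theorem length_markMultiples (n : Nat) (arr : List Bool) (i : Nat) :
    (markMultiples n arr i).length = arr.length := by
  unfold markMultiples; exact length_foldl_set _ _ _

theorem getD_markMultiples (n : Nat) (arr : List Bool) (i j : Nat)
    (hlen : arr.length = n + 1) (hi : 0 < i) :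
    (markMultiples n arr i).getD j false =
      if i * i ≤ j ∧ j ≤ n ∧ i ∣ j then false else arr.getD j false := by
  unfold markMultiples
  rw [getD_foldl_set, hlen]
  simp only [mem_rng _ _ _ _ hi]
  congr 1
  apply propext
  constructor
  · rintro ⟨⟨h1, h2, t, ht⟩, h3⟩
    refine ⟨h1, by omega, ?_⟩
    have : j = i * t + i * i := by omega
    exact ⟨t + i, by rw [this]; ring⟩
  · rintro ⟨h1, h2, t, ht⟩
    refine ⟨⟨h1, by omega, t - i, ?_⟩, by omega⟩
    have hti : i ≤ t := by nlinarith
    have : i * t = i * (t - i) + i * i := by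
      have h3 : t - i + i = t := by omega
      calc i * t = i * (t - i + i) := by rw [h3]
      _ = i * (t - i) + i * i := by ring
    omega

theorem noSmall_succ_of_not_prime (i j : Nat) (hnp : ¬ i.Prime) :
    noSmall (i + 1) j ↔ noSmall i j := by
  constructor
  · exact fun h p hp => h p (by omega)
  · intro h p hp hpp hdvd hsq
    rcases Nat.lt_succ_iff_lt_or_eq.mp hp with h' | rfl
    · exact h p h' hpp hdvd hsq
    · exact hnp hpp

theorem inv_skip (n i : Nat) (arr : List Bool) (h : SInv n i arr) (hnp : ¬ i.Prime) :
    SInv n (i + 1) arr := by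
  refine ⟨h.1, fun j => ?_⟩
  rw [h.2 j]
  simp [noSmall_succ_of_not_prime i j hnp]

theorem inv_mark (n i : Nat) (arr : List Bool) (h : SInv n i arr) (hp : i.Prime) :
    SInv n (i + 1) (markMultiples n arr i) := by
  refine ⟨by rw [length_markMultiples, h.1], fun j => ?_⟩
  rw [getD_markMultiples n arr i j h.1 (by have := hp.two_le; omega), h.2 j]
  have key : (j ≤ n ∧ 2 ≤ j ∧ noSmall (i + 1) j) ↔
      ((j ≤ n ∧ 2 ≤ j ∧ noSmall i j) ∧ ¬(i * i ≤ j ∧ j ≤ n ∧ i ∣ j)) := by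
    constructor
    · rintro ⟨h1, h2, hns⟩
      refine ⟨⟨h1, h2, fun p hpi => hns p (by omega)⟩, ?_⟩
      rintro ⟨hsq, _, hdvd⟩
      exact hns i (by omega) hp hdvd hsq
    · rintro ⟨⟨h1, h2, hns⟩, hni⟩
      refine ⟨h1, h2, fun p hpi hpp hdvd hsq => ?_⟩
      rcases Nat.lt_succ_iff_lt_or_eq.mp hpi with h' | rfl
      · exact hns p h' hpp hdvd hsq
      · exact hni ⟨hsq, h1, hdvd⟩
  have hdd : decide (j ≤ n ∧ 2 ≤ j ∧ noSmall (i + 1) j)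
      = decide ((j ≤ n ∧ 2 ≤ j ∧ noSmall i j) ∧ ¬(i * i ≤ j ∧ j ≤ n ∧ i ∣ j)) :=
    decide_eq_decide.mpr key
  rw [hdd]
  split_ifs with hc <;> simp [hc]

-- A's initial array (evens ≥ 4 struck out) satisfies the invariant at i = 3
theorem inv_initA (n : Nat) :
    SInv n 3 ((rng 4 (n + 1) 2).foldl (fun a m => a.set m false)
      (((List.replicate (n + 1) true).set 0 false).set 1 false)) := by
  refine ⟨by rw [length_foldl_set]; simp, fun j => ?_⟩
  rw [getD_foldl_set]
  simp only [List.length_set, List.length_replicate, base_getD]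
  simp only [mem_rng _ _ _ _ (by omega : (0:Nat) < 2)]
  have hns : (2 ≤ j ∧ noSmall 3 j) ↔ (2 ≤ j ∧ ¬(2 ∣ j ∧ 4 ≤ j)) := by
    constructor
    · rintro ⟨h2, hns⟩
      exact ⟨h2, fun ⟨hdvd, h4⟩ => hns 2 (by omega) Nat.prime_two hdvd (by omega)⟩
    · rintro ⟨h2, hni⟩
      refine ⟨h2, fun p hp hpp hdvd hsq => ?_⟩
      have hp2 : p = 2 := by have := hpp.two_le; omega
      subst hp2
      exact hni ⟨hdvd, by omega⟩
  have hmem : ((4 ≤ j ∧ j < n + 1 ∧ 2 ∣ j - 4) ∧ j < n + 1) ↔ (j ≤ n ∧ 2 ∣ j ∧ 4 ≤ j) := by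
    constructor
    · rintro ⟨⟨h4, hlt, t, ht⟩, -⟩
      exact ⟨by omega, ⟨t + 2, by omega⟩, h4⟩
    · rintro ⟨hle, ⟨t, ht⟩, h4⟩
      exact ⟨⟨h4, by omega, t - 2, by omega⟩, by omega⟩
  split_ifs with hc
  · have := hmem.mp hc
    symm
    simp only [decide_eq_false_iff_not]
    rintro ⟨h1, h2, hns2⟩
    exact (hns.mp ⟨h2, hns2⟩).2 ⟨this.2.1, this.2.2⟩
  · apply decide_eq_decide.mpr
    constructor
    · rintro ⟨h1, h2⟩
      have hni : ¬(2 ∣ j ∧ 4 ≤ j) := fun hh => hc (hmem.mpr ⟨h1, hh.1, hh.2⟩)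
      exact ⟨h1, h2, (hns.mpr ⟨h2, hni⟩).2⟩
    · rintro ⟨h1, h2, -⟩; exact ⟨h1, h2⟩

-- the set of k' witnessing expressibility, as scanned by A's inner while loop
abbrev ExprW (i k : Nat) : Prop := ∃ k' < i, k ≤ k' ∧ k' * k' * 2 < i ∧ (i - k' * k' * 2).Prime

theorem witnessLoop_eq (n i : Nat) (arr : List Bool) (h : SInv n i arr)
    (hin : i ≤ n) (hi : 0 < i) (k : Nat) :
    witnessLoop arr i k = decide (ExprW i k) := by
  rw [witnessLoop]
  by_cases hk : k * k * 2 < i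
  · simp only [hk, if_true]
    have hklt : k < i := by nlinarith
    have hsub : i - k * k * 2 ≤ i := by omega
    have harr : arr.getD (i - k * k * 2) false = decide ((i - k * k * 2).Prime) := by
      rw [h.2]
      apply decide_eq_decide.mpr
      constructor
      · rintro ⟨-, h2, hns⟩
        exact (noSmall_iff_prime i _ hsub).mp ⟨h2, hns⟩
      · intro hp
        have := (noSmall_iff_prime i _ hsub).mpr hp
        exact ⟨by omega, this.1, this.2⟩
    rw [harr]
    by_cases hp : (i - k * k * 2).Prime
    · simp only [hp, decide_true, if_true]
      exact (decide_eq_true (⟨k, hklt, le_refl k, hk, hp⟩ : ExprW i k)).symm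
    · simp only [hp, decide_false]
      rw [witnessLoop_eq n i arr h hin hi (k + 1)]
      apply decide_eq_decide.mpr
      constructor
      · rintro ⟨k', hk1, hk2, hk3, hk4⟩
        exact ⟨k', hk1, by omega, hk3, hk4⟩
      · rintro ⟨k', hk1, hk2, hk3, hk4⟩
        have hne : k ≠ k' := fun he => hp (he ▸ hk4)
        exact ⟨k', hk1, by omega, hk3, hk4⟩
  · simp only [hk, if_false]
    symm
    simp only [decide_eq_false_iff_not]
    rintro ⟨k', -, hk2, hk3, -⟩
    have : k * k ≤ k' * k' := Nat.mul_le_mul hk2 hk2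
    omega
termination_by i - k * k * 2
decreasing_by
  have h2 : k * k * 2 + 1 ≤ (k + 1) * (k + 1) * 2 := by nlinarith
  omega

-- the predicate both programs search for: odd composite, not prime + 2k²
def cand (i : Nat) : Bool := !decide i.Prime && !decide (ExprW i 1)

theorem not_prime_succ_of_odd (i : Nat) (h3 : 3 ≤ i) (hodd : i % 2 = 1) : ¬ (i + 1).Prime := by
  intro hp
  have heven : Even (i + 1) := Nat.even_iff.mpr (by omega)
  have := (Nat.Prime.even_iff hp).mp heven
  omega

theorem getD_eq_decide_prime (n i : Nat) (arr : List Bool) (h : SInv n i arr) (hin : i ≤ n) :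
    arr.getD i false = decide i.Prime := by
  rw [h.2]
  apply decide_eq_decide.mpr
  constructor
  · rintro ⟨-, h2, hns⟩
    exact (noSmall_iff_prime i i le_rfl).mp ⟨h2, hns⟩
  · intro hp
    have := (noSmall_iff_prime i i le_rfl).mpr hp
    exact ⟨hin, this.1, this.2⟩

theorem loopA_eq (n : Nat) :
    ∀ f i arr, n + 1 - i ≤ f → 3 ≤ i → i % 2 = 1 → SInv n i arr →
      loopA n arr (rng i (n + 1) 2) = ((rng i (n + 1) 2).find? cand).map (fun m => (m : Int)) := by
  intro f
  induction f with
  | zero =>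
      intro i arr hf _ _ _
      rw [rng_nil _ _ _ (by omega)]
      rfl
  | succ f ih =>
      intro i arr hf h3 hodd h
      by_cases hi : i < n + 1
      · rw [rng_cons _ _ _ hi (by omega)]
        have harr := getD_eq_decide_prime n i arr h (by omega)
        simp only [loopA, List.find?_cons]
        by_cases hp : i.Prime
        · rw [harr]
          simp only [hp, decide_true, if_true]
          have hcand : cand i = false := by simp [cand, hp]
          rw [hcand]
          have hinv2 : SInv n (i + 2) (markMultiples n arr i) := by
            have h1 := inv_mark n i arr h hp
            have h2 := inv_skip n (i + 1) _ h1 (not_prime_succ_of_odd i h3 hodd)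
            simpa [Nat.add_assoc] using h2
          exact ih (i + 2) _ (by omega) (by omega) (by omega) hinv2
        · rw [harr]
          simp only [hp, decide_false, if_false, Bool.false_eq_true]
          rw [witnessLoop_eq n i arr h (by omega) (by omega) 1]
          have hinv2 : SInv n (i + 2) arr := by
            have h1 := inv_skip n i arr h hp
            have h2 := inv_skip n (i + 1) _ h1 (not_prime_succ_of_odd i h3 hodd)
            simpa [Nat.add_assoc] using h2
          by_cases hw : ExprW i 1
          · simp only [hw, decide_true, if_true]
            have hcand : cand i = false := by simp [cand, hw]
            rw [hcand]
            exact ih (i + 2) _ (by omega) (by omega) (by omega) hinv2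
          · simp only [hw, decide_false]
            have hcand : cand i = true := by simp [cand, hw, hp]
            rw [hcand]
            rfl
      · rw [rng_nil _ _ _ (by omega)]
        rfl

-- ===== B side =====
theorem sinv_top (n i : Nat) (arr : List Bool) (hi : n + 1 ≤ i) (h : SInv n i arr) :
    ∀ j, arr.getD j false = decide (j ≤ n ∧ j.Prime) := by
  intro j
  rw [h.2]
  apply decide_eq_decide.mpr
  constructor
  · rintro ⟨h1, h2, hns⟩
    exact ⟨h1, (noSmall_iff_prime i j (by omega)).mp ⟨h2, hns⟩⟩
  · rintro ⟨h1, hp⟩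
    have := (noSmall_iff_prime i j (by omega)).mpr hp
    exact ⟨h1, this.1, this.2⟩

theorem sieveB_fold (n : Nat) :
    ∀ f i arr, n + 1 - i ≤ f → SInv n i arr →
      ∀ j, ((rng i (n + 1) 1).foldl
          (fun a i => if a.getD i false then markMultiples n a i else a) arr).getD j false
        = decide (j ≤ n ∧ j.Prime) := by
  intro f
  induction f with
  | zero =>
      intro i arr hf h j
      rw [rng_nil _ _ _ (by omega)]
      exact sinv_top n i arr (by omega) h j
  | succ f ih =>
      intro i arr hf h j
      by_cases hi : i < n + 1
      · rw [rng_cons _ _ _ hi (by omega), List.foldl_cons]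
        have harr := getD_eq_decide_prime n i arr h (by omega)
        by_cases hp : i.Prime
        · rw [harr]
          simp only [hp, decide_true, if_true]
          exact ih (i + 1) _ (by omega) (inv_mark n i arr h hp) j
        · rw [harr]
          simp only [hp, decide_false, Bool.false_eq_true, if_false]
          exact ih (i + 1) _ (by omega) (inv_skip n i arr h hp) j
      · rw [rng_nil _ _ _ (by omega)]
        exact sinv_top n i arr (by omega) h j

theorem sieveB_getD (n j : Nat) : (sieveB n).getD j false = decide (j ≤ n ∧ j.Prime) := by
  unfold sieveB
  exact sieveB_fold n (n + 1) 2 _ (by omega) (inv_base n) j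

theorem length_exprMark (n p : Nat) (l : List Nat) (e : List Bool) :
    (exprMark n e p l).length = e.length := by
  induction l generalizing e with
  | nil => rfl
  | cons t rest ih =>
      rw [exprMark]
      by_cases hc : p + t > n
      · simp [hc]
      · simp only [hc, if_false]
        rw [ih]
        simp

theorem exprMark_twoks_getD (n p k : Nat) (e : List Bool) (hlen : e.length = n + 1) (j : Nat) :
    (exprMark n e p (twoksLoop n k)).getD j false
      = (e.getD j false || decide (∃ k' ≤ n, k ≤ k' ∧ p + 2 * k' * k' = j ∧ j ≤ n)) := by
  rw [twoksLoop]
  by_cases ht : 2 * k * k ≤ n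
  · simp only [ht, if_true]
    rw [exprMark]
    by_cases hc : p + 2 * k * k > n
    · simp only [hc, if_true]
      have hno : ¬(∃ k' ≤ n, k ≤ k' ∧ p + 2 * k' * k' = j ∧ j ≤ n) := by
        rintro ⟨k', hk1, hk2, hk3, hk4⟩
        have : 2 * k * k ≤ 2 * k' * k' := Nat.mul_le_mul (by omega) hk2
        omega
      simp [hno]
    · simp only [hc, if_false]
      rw [exprMark_twoks_getD n p (k + 1) _ (by simp [hlen]) j, getD_set, hlen]
      by_cases hj : p + 2 * k * k = j ∧ j < n + 1
      · simp only [hj, and_self, if_true]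
        have hkn : k ≤ n := by nlinarith [ht]
        have : (∃ k' ≤ n, k ≤ k' ∧ p + 2 * k' * k' = j ∧ j ≤ n) :=
          ⟨k, hkn, le_refl k, hj.1, by omega⟩
        simp [this]
      · simp only [hj, if_false]
        congr 1
        apply decide_eq_decide.mpr
        constructor
        · rintro ⟨k', hk1, hk2, hk3, hk4⟩
          exact ⟨k', hk1, by omega, hk3, hk4⟩
        · rintro ⟨k', hk1, hk2, hk3, hk4⟩
          have hne : k ≠ k' := by
            rintro rfl
            exact hj ⟨hk3, by omega⟩
          exact ⟨k', hk1, by omega, hk3, hk4⟩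
  · simp only [ht, if_false]
    rw [exprMark]
    have hno : ¬(∃ k' ≤ n, k ≤ k' ∧ p + 2 * k' * k' = j ∧ j ≤ n) := by
      rintro ⟨k', hk1, hk2, hk3, hk4⟩
      have : 2 * k * k ≤ 2 * k' * k' := Nat.mul_le_mul (by omega) hk2
      omega
    simp [hno]
termination_by n + 1 - 2 * k * k
decreasing_by
  have h2 : 2 * k * k + 1 ≤ 2 * (k + 1) * (k + 1) := by nlinarith
  omega

theorem exprB_fold (n : Nat) (sieve : List Bool)
    (hs : ∀ j, sieve.getD j false = decide (j ≤ n ∧ j.Prime)) :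
    ∀ f i e, n + 1 - i ≤ f → e.length = n + 1 →
      (∀ j, e.getD j false
        = decide (∃ p' < i, p' ≤ n ∧ p'.Prime ∧ ∃ k ≤ n, 1 ≤ k ∧ p' + 2 * k * k = j ∧ j ≤ n)) →
      ∀ j, ((rng i (n + 1) 1).foldl
          (fun e p => if sieve.getD p false then exprMark n e p (twoksLoop n 1) else e) e).getD j false
        = decide (∃ p' ≤ n, p'.Prime ∧ ∃ k ≤ n, 1 ≤ k ∧ p' + 2 * k * k = j ∧ j ≤ n) := by
  intro f
  induction f with
  | zero =>
      intro i e hf hlen he j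
      rw [rng_nil _ _ _ (by omega), List.foldl_nil, he j]
      apply decide_eq_decide.mpr
      constructor
      · rintro ⟨p', -, hrest⟩
        exact ⟨p', hrest⟩
      · rintro ⟨p', h1, hrest⟩
        exact ⟨p', by omega, h1, hrest⟩
  | succ f ih =>
      intro i e hf hlen he j
      by_cases hi : i < n + 1
      · rw [rng_cons _ _ _ hi (by omega), List.foldl_cons, hs i]
        by_cases hp : i.Prime
        · have : (i ≤ n ∧ i.Prime) := ⟨by omega, hp⟩
          rw [if_pos (decide_eq_true this)]
          apply ih (i + 1) _ (by omega) (by rw [length_exprMark]; exact hlen)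
          intro j'
          rw [exprMark_twoks_getD n i 1 e hlen j', he j']
          rw [← Bool.decide_or]
          apply decide_eq_decide.mpr
          constructor
          · rintro (⟨p', hp1, hrest⟩ | ⟨k, hk1, hk2, hk3, hk4⟩)
            · exact ⟨p', by omega, hrest⟩
            · exact ⟨i, by omega, ⟨by omega, hp, k, hk1, hk2, hk3, hk4⟩⟩
          · rintro ⟨p', hp1, hp2, hp3, hrest⟩
            rcases Nat.lt_succ_iff_lt_or_eq.mp hp1 with h' | rfl
            · exact Or.inl ⟨p', h', hp2, hp3, hrest⟩
            · exact Or.inr hrest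
        · have hni : ¬(i ≤ n ∧ i.Prime) := fun hh => hp hh.2
          rw [if_neg (by simp [hni])]
          apply ih (i + 1) _ (by omega) hlen
          intro j'
          rw [he j']
          apply decide_eq_decide.mpr
          constructor
          · rintro ⟨p', hp1, hrest⟩
            exact ⟨p', by omega, hrest⟩
          · rintro ⟨p', hp1, hrest⟩
            rcases Nat.lt_succ_iff_lt_or_eq.mp hp1 with h' | rfl
            · exact ⟨p', h', hrest⟩
            · exact absurd hrest.2.1 hp
      · rw [rng_nil _ _ _ (by omega), List.foldl_nil, he j]
        apply decide_eq_decide.mpr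
        constructor
        · rintro ⟨p', -, hrest⟩
          exact ⟨p', hrest⟩
        · rintro ⟨p', h1, hrest⟩
          exact ⟨p', by omega, h1, hrest⟩

theorem exprB_getD (n j : Nat) :
    (exprB n (sieveB n)).getD j false
      = decide (∃ p' ≤ n, p'.Prime ∧ ∃ k ≤ n, 1 ≤ k ∧ p' + 2 * k * k = j ∧ j ≤ n) := by
  unfold exprB
  apply exprB_fold n (sieveB n) (sieveB_getD n) (n + 1) 2 _ (by omega) (by simp)
  intro j'
  have h1 : (List.replicate (n + 1) false).getD j' false = false := by
    simp [List.getD_eq_getElem?_getD, List.getElem?_replicate]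
    split_ifs <;> simp
  rw [h1]
  symm
  simp only [decide_eq_false_iff_not]
  rintro ⟨p', hp1, -, hp3, -⟩
  have := hp3.two_le
  omega

-- B's final scan tests the same predicate as A's search
theorem test_eq_cand (n x : Nat) (_hx3 : 3 ≤ x) (hxn : x ≤ n) :
    (!(sieveB n).getD x false && !(exprB n (sieveB n)).getD x false) = cand x := by
  rw [sieveB_getD, exprB_getD]
  unfold cand
  congr 1
  · congr 1
    apply decide_eq_decide.mpr
    constructor
    · rintro ⟨-, hp⟩; exact hp
    · intro hp; exact ⟨hxn, hp⟩
  · congr 1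
    apply decide_eq_decide.mpr
    constructor
    · rintro ⟨p', hp1, hp2, k, hkn, hk1, heq, hxn'⟩
      have h2p := hp2.two_le
      have hkk : k ≤ 2 * k * k := by nlinarith
      have hr : 2 * k * k = k * k * 2 := by ring
      refine ⟨k, by omega, hk1, by omega, ?_⟩
      have : x - k * k * 2 = p' := by omega
      rw [this]; exact hp2
    · rintro ⟨k', hk'x, hk1, hlt, hp⟩
      have h2p := hp.two_le
      have hr : 2 * k' * k' = k' * k' * 2 := by ring
      exact ⟨x - k' * k' * 2, by omega, hp, k', by omega, hk1, by omega, by omega⟩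

theorem solution_eq (limit : Int) (h1 : 1 ≤ limit) : solution limit = solution_alt limit := by
  unfold solution solution_alt
  rw [if_neg (by omega), if_neg (by omega)]
  have hA := loopA_eq limit.toNat (limit.toNat + 1) 3 _ (by omega) (by omega) (by omega)
    (inv_initA limit.toNat)
  rw [hA]
  dsimp only
  have hfind : (rng 3 (limit.toNat + 1) 2).find?
      (fun i => !(sieveB limit.toNat).getD i false
        && !(exprB limit.toNat (sieveB limit.toNat)).getD i false)
      = (rng 3 (limit.toNat + 1) 2).find? cand := by
    apply find?_congr
    intro x hx
    rw [mem_rng _ _ _ _ (by omega : (0:Nat) < 2)] at hx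
    exact test_eq_cand limit.toNat x hx.1 (by omega)
  rw [hfind]

-- ===== VERDICT (by name: the statement is the Claim_ definition above) =====
theorem solution_spec : Claim_equal_solution := by
  intro limit _ hpre
  unfold Pre_solution at hpre
  unfold Spec_solution
  exact solution_eq limit hpre
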